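-- pv_equiv track=rewrite | github.com/OndrejSladky/kmercamel | convert_superstring.py | split_superstring
-- ===== SOURCE A (Python) =====
-- from typing import List
--
-- def split_superstring(superstring: str, k: int) -> List[str]:
--     """
--     Split the given superstring into strings where at every position (except for the last k-1) begins a k-mer.
--     """
--     ret: List[str] = []
--     next_start = 0
--     was_present = False
--     for i, c in enumerate(superstring):
--         if c.islower():
--             if was_present:
--                 ret.append(superstring[next_start: i + (k - 1)].upper())
--             next_start = i + 1
--             was_present = False
--         else:
--             was_present = True
--     return ret
-- ===== SOURCE B (Python) =====
-- from typing import List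
--
-- def split_superstring(superstring: str, k: int) -> List[str]:
--     """Right-to-left scan building the output back-to-front: keep the index of
--     the nearest lowercase char to the right; each lowercase char closes the
--     piece that ends at that neighbour; a final step emits the piece starting
--     at position 0, and the collected pieces are reversed at the end."""
--     ret: List[str] = []
--     nxt = None
--     for i, c in reversed(list(enumerate(superstring))):
--         if c.islower():
--             if nxt is not None and nxt > i + 1:
--                 ret.append(superstring[i + 1: nxt + (k - 1)].upper())
--             nxt = i
--     if nxt is not None and nxt > 0:
--         ret.append(superstring[0: nxt + (k - 1)].upper())
--     ret.reverse()
--     return ret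
-- ===== Notes on version B (the rewrite author's own statement) =====
-- stated objective: alternative
-- what changed: Replaces A's forward stateful scan (next_start/was_present flags, emitting at each closing lowercase) with a right-to-left scan that keeps the index of the nearest lowercase to the RIGHT, builds the pieces back-to-front, handles the leading piece in a final step, and reverses the result.
import Mathlib
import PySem

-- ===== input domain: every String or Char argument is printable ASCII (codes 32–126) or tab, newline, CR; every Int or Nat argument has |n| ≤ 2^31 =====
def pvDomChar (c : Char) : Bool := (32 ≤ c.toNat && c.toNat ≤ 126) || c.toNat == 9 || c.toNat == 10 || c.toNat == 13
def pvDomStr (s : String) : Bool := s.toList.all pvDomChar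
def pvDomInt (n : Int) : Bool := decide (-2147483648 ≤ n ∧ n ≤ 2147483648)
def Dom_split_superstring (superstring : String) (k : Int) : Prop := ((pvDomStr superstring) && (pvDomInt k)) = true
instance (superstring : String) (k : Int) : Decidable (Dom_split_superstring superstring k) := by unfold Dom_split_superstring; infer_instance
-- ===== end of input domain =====

-- B replaces A's forward next_start/was_present scan with a right-to-left scan that
-- builds the pieces back-to-front and reverses at the end; objective: alternative (same cost).


-- ===== PORT A =====
-- loop body of A's for-loop: state (ret, next_start, was_present)
def splitStepA (s : String) (k : Int) (st : List String × Int × Bool) (p : Int × Char) :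
    List String × Int × Bool :=
  if PySem.Chars.islower p.2 then
    ((if st.2.2 then
        st.1 ++ [PySem.Str.upper (PySem.Str.slice s (some st.2.1) (some (p.1 + (k - 1))))]
      else st.1),
     p.1 + 1, false)
  else (st.1, st.2.1, true)

def split_superstring (superstring : String) (k : Int) : List String :=
  ((PySem.List.enumerate superstring.toList 0).foldl (splitStepA superstring k)
    ([], 0, false)).1

-- ===== PORT B =====
-- loop body of B's for-loop over reversed(list(enumerate(superstring))): state (ret, nxt)
def splitStepRev (s : String) (k : Int) (st : List String × Option Int) (p : Int × Char) :
    List String × Option Int :=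
  if PySem.Chars.islower p.2 then
    ((match st.2 with
      | some n =>
        if n > p.1 + 1 then
          st.1 ++ [PySem.Str.upper (PySem.Str.slice s (some (p.1 + 1)) (some (n + (k - 1))))]
        else st.1
      | none => st.1), some p.1)
  else st

def split_superstring_alt (superstring : String) (k : Int) : List String :=
  let st := ((PySem.List.enumerate superstring.toList 0).reverse).foldl
              (splitStepRev superstring k) ([], none)
  let ret := match st.2 with
    | some n =>
      if n > 0 then
        st.1 ++ [PySem.Str.upper (PySem.Str.slice superstring (some 0) (some (n + (k - 1))))]
      else st.1
    | none => st.1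
  ret.reverse

-- ===== PRECONDITION & SPEC =====
def Spec_split_superstring (superstring : String) (k : Int) (out : List String) : Prop := out = split_superstring_alt superstring k
instance (superstring : String) (k : Int) (out : List String) : Decidable (Spec_split_superstring superstring k out) := by unfold Spec_split_superstring; infer_instance

-- ===== CLAIM (what is proved, stated in full; the proofs are below) =====
def Claim_equal_split_superstring : Prop := ∀ (superstring : String) (k : Int), Dom_split_superstring superstring k → Spec_split_superstring superstring k (split_superstring superstring k)

-- ===== LEMMAS AND PROOFS =====

-- Forward reference loop on the lowercase indices only (prev = previous lowercase index)
def splitStepF (s : String) (k : Int) (st : List String × Int) (i : Int) :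
    List String × Int :=
  ((if i > st.2 + 1 then
      st.1 ++ [PySem.Str.upper (PySem.Str.slice s (some (st.2 + 1)) (some (i + (k - 1))))]
    else st.1),
   i)

-- the pieces emitted by the forward loop starting from previous lowercase index `prev`
def adjF (s : String) (k : Int) : List Int → Int → List String
  | [], _ => []
  | j :: t, prev =>
    (if j > prev + 1 then
       [PySem.Str.upper (PySem.Str.slice s (some (prev + 1)) (some (j + (k - 1))))]
     else []) ++ adjF s k t j

-- B's reverse step restricted to the index component (all filtered pairs are lowercase)
def splitStepRevI (s : String) (k : Int) (st : List String × Option Int) (i : Int) :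
    List String × Option Int :=
  ((match st.2 with
    | some n =>
      if n > i + 1 then
        st.1 ++ [PySem.Str.upper (PySem.Str.slice s (some (i + 1)) (some (n + (k - 1))))]
      else st.1
    | none => st.1), some i)

-- A equals the forward fold over the lowercase indices (invariant on A's state)
theorem splitLoopA_eq (s : String) (k : Int) :
    ∀ (cs : List Char) (i : Int) (ret : List String) (prev : Int), prev + 1 ≤ i →
      ((PySem.List.enumerate cs i).foldl (splitStepA s k) (ret, prev + 1, decide (prev + 1 < i))).1
        = ((((PySem.List.enumerate cs i).filter (fun p => PySem.Chars.islower p.2)).map (·.1)).foldl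
            (splitStepF s k) (ret, prev)).1 := by
  intro cs
  induction cs with
  | nil => intro i ret prev _; simp [PySem.List.enumerate_nil]
  | cons c cs ih =>
    intro i ret prev hle
    rw [PySem.List.enumerate_cons]
    by_cases h : PySem.Chars.islower c
    · simp only [List.foldl_cons, List.filter_cons, h, splitStepA]
      have hA : (decide (prev + 1 < i) : Bool) = decide (i > prev + 1) := by
        simp [gt_iff_lt]
      rw [hA]
      have := ih (i + 1) (if decide (i > prev + 1) = true then
          ret ++ [PySem.Str.upper (PySem.Str.slice s (some (prev + 1)) (some (i + (k - 1))))]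
        else ret) i (by omega)
      simpa [splitStepF] using this
    · simp only [List.foldl_cons, List.filter_cons, h, splitStepA, Bool.false_eq_true,
        if_false]
      have hT : (true : Bool) = decide (prev + 1 < i + 1) := by
        simp; omega
      rw [hT]
      exact ih (i + 1) ret prev (by omega)

-- forward fold accumulates exactly adjF
theorem foldF_eq_adjF (s : String) (k : Int) :
    ∀ (l : List Int) (ret : List String) (prev : Int),
      (l.foldl (splitStepF s k) (ret, prev)).1 = ret ++ adjF s k l prev := by
  intro l
  induction l with
  | nil => intro ret prev; simp [adjF]
  | cons j t ih =>
    intro ret prev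
    simp only [List.foldl_cons, splitStepF, adjF]
    rw [ih]
    by_cases h : j > prev + 1 <;> simp [h]

-- B's reverse fold skips non-lowercase pairs
theorem foldRev_filter (s : String) (k : Int) :
    ∀ (l : List (Int × Char)) (st : List String × Option Int),
      l.foldl (splitStepRev s k) st
        = (l.filter (fun p => PySem.Chars.islower p.2)).foldl (splitStepRev s k) st := by
  intro l
  induction l with
  | nil => intro st; simp
  | cons p t ih =>
    intro st
    by_cases h : PySem.Chars.islower p.2
    · simp [h, ih]
    · simp [h, ih, splitStepRev]

-- on all-lowercase pairs the reverse fold only looks at the index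
theorem foldRev_toIdx (s : String) (k : Int) :
    ∀ (l : List (Int × Char)), (∀ p ∈ l, PySem.Chars.islower p.2) →
      ∀ st, l.foldl (splitStepRev s k) st = (l.map (·.1)).foldl (splitStepRevI s k) st := by
  intro l
  induction l with
  | nil => intro _ st; simp
  | cons p t ih =>
    intro hall st
    have hp : PySem.Chars.islower p.2 := hall p (by simp)
    simp only [List.foldl_cons, List.map_cons]
    rw [ih (fun q hq => hall q (by simp [hq]))]
    congr 1
    simp [splitStepRev, splitStepRevI, hp]

-- core invariant of the backward fold over the reversed lowercase-index list
theorem foldRevI_core (s : String) (k : Int) :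
    ∀ (l : List Int) (acc : List String),
      (l.reverse.foldl (splitStepRevI s k) (acc, none))
        = (acc ++ (match l with | [] => [] | j :: t => adjF s k t j).reverse, l.head?) := by
  intro l
  induction l with
  | nil => intro acc; simp
  | cons j t ih =>
    intro acc
    simp only [List.reverse_cons, List.foldl_append, List.foldl_cons, List.foldl_nil]
    rw [ih acc]
    cases t with
    | nil => simp [splitStepRevI, adjF]
    | cons h t' =>
      simp only [List.head?_cons, splitStepRevI, adjF]
      by_cases hg : h > j + 1 <;> simp [hg]

-- ===== VERDICT (by name: the statement is the Claim_ definition above) =====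
theorem split_superstring_spec : Claim_equal_split_superstring := by
  intro superstring k _
  unfold Spec_split_superstring split_superstring split_superstring_alt
  -- A's side: forward fold over the lowercase indices
  have hA := splitLoopA_eq superstring k superstring.toList 0 [] (-1) (by omega)
  simp only [show (-1 : Int) + 1 = 0 from by omega, show (decide ((0:Int) < 0) : Bool) = false from by simp] at hA
  set lows : List Int :=
    (((PySem.List.enumerate superstring.toList 0).filter
        (fun p => PySem.Chars.islower p.2)).map (·.1)) with hlows
  rw [hA, foldF_eq_adjF]
  -- B's side
  rw [foldRev_filter, List.filter_reverse,
      foldRev_toIdx superstring k _ (by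
        intro p hp
        simp only [List.mem_reverse, List.mem_filter] at hp
        exact hp.2)]
  rw [List.map_reverse, ← hlows, foldRevI_core]
  cases lows with
  | nil => simp [adjF]
  | cons j t =>
    simp only [List.head?_cons, List.nil_append, adjF,
      show (-1 : Int) + 1 = 0 from by omega]
    by_cases hg : j > 0 <;> simp [hg]
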